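-- pv_equiv track=rewrite | github.com/zoharmx/tikun-backend | sefirot/keter.py | _assess_corruption_severity
-- ===== SOURCE A (Python) =====
-- from typing import Dict, Any, List, Tuple
--
-- def _assess_corruption_severity(corruptions: List[Dict[str, Any]]) -> str:
--     """Assess overall corruption severity"""
--     if not corruptions:
--         return 'none'
--
--     severities = [c.get('severity', 'minor') for c in corruptions]
--
--     if 'critical' in severities:
--         return 'critical'
--     elif 'moderate' in severities:
--         return 'moderate'
--     else:
--         return 'minor'
-- ===== SOURCE B (Python) =====
-- def _assess_corruption_severity(corruptions):
--     """Assess overall corruption severity (single max-fold pass)."""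
--     if not corruptions:
--         return 'none'
--     rank = 1
--     for c in corruptions:
--         s = c.get('severity', 'minor')
--         p = 3 if s == 'critical' else (2 if s == 'moderate' else 1)
--         rank = max(rank, p)
--     return 'critical' if rank == 3 else ('moderate' if rank == 2 else 'minor')
-- ===== Notes on version B (the rewrite author's own statement) =====
-- stated objective: alternative
-- what changed: Replaces building the severities list and doing two membership scans with a single pass that folds each severity to a numeric rank and keeps the running maximum, translating the max back to a label at the end.
import Mathlib
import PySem

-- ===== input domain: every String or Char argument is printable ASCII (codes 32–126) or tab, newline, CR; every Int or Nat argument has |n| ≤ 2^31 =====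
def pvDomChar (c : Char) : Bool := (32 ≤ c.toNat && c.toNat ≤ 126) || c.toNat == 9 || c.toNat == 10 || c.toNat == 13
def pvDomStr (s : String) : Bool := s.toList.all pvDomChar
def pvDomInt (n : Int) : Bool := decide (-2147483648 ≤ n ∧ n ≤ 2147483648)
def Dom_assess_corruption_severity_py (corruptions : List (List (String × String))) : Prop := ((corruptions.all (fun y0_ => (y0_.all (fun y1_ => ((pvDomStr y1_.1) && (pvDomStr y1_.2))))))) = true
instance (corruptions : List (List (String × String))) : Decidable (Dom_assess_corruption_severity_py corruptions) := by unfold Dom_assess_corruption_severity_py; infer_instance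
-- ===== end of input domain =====

-- B replaces A's severities list and two membership scans by one max-fold over numeric ranks (alternative decomposition, same cost).

-- ===== PORT A =====
-- c.get('severity', 'minor') on the dict-as-assoc-list: first match, exact
def pvGetSev (c : List (String × String)) : String :=
  match c.find? (fun kv => kv.1 == "severity") with
  | some kv => kv.2
  | none => "minor"

def assess_corruption_severity_py (corruptions : List (List (String × String))) : String :=
  if corruptions = [] then "none"
  else
    let severities := corruptions.map pvGetSev
    if severities.contains "critical" then "critical"
    else if severities.contains "moderate" then "moderate"
    else "minor"

-- ===== PORT B =====
def pvPrio (s : String) : Nat :=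
  if s = "critical" then 3 else if s = "moderate" then 2 else 1

def assess_corruption_severity_py_alt (corruptions : List (List (String × String))) : String :=
  match corruptions with
  | [] => "none"
  | _ =>
    let rank := corruptions.foldl (fun m c => max m (pvPrio (pvGetSev c))) 1
    if rank = 3 then "critical" else if rank = 2 then "moderate" else "minor"

-- ===== PRECONDITION & SPEC =====
def Spec_assess_corruption_severity_py (corruptions : List (List (String × String))) (out : String) : Prop := out = assess_corruption_severity_py_alt corruptions
instance (corruptions : List (List (String × String))) (out : String) : Decidable (Spec_assess_corruption_severity_py corruptions out) := by unfold Spec_assess_corruption_severity_py; infer_instance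

-- ===== CLAIM (what is proved, stated in full; the proofs are below) =====
def Claim_equal_assess_corruption_severity_py : Prop := ∀ (corruptions : List (List (String × String))), Dom_assess_corruption_severity_py corruptions → Spec_assess_corruption_severity_py corruptions (assess_corruption_severity_py corruptions)

-- ===== LEMMAS AND PROOFS =====

-- characterisation of B's max-fold by A's membership tests
theorem pvFold_char (xs : List (List (String × String))) : ∀ m : Nat, 1 ≤ m → m ≤ 3 →
    xs.foldl (fun m c => max m (pvPrio (pvGetSev c))) m =
      if (xs.map pvGetSev).contains "critical" then 3
      else if (xs.map pvGetSev).contains "moderate" then max m 2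
      else m := by
  induction xs with
  | nil => intro m h1 h3; simp
  | cons c xs ih =>
    intro m h1 h3
    simp only [List.foldl_cons, List.map_cons, List.contains_cons]
    by_cases hc : pvGetSev c = "critical"
    · have hp : pvPrio (pvGetSev c) = 3 := by simp [pvPrio, hc]
      rw [hp, ih (max m 3) (by omega) (by omega)]
      have hcb : ("critical" == pvGetSev c) = true := by simp [hc]
      have h3' : max m 3 = 3 := by omega
      rw [hcb, h3']
      simp
    · by_cases hm : pvGetSev c = "moderate"
      · have hp : pvPrio (pvGetSev c) = 2 := by simp [pvPrio, hm]
        rw [hp, ih (max m 2) (by omega) (by omega)]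
        have hcb : ("critical" == pvGetSev c) = false := by
          simp only [beq_eq_false_iff_ne]; exact Ne.symm hc
        have hmb : ("moderate" == pvGetSev c) = true := by simp [hm]
        rw [hcb, hmb]
        simp only [Bool.false_or, Bool.true_or]
        split_ifs <;> omega
      · have hp : pvPrio (pvGetSev c) = 1 := by simp [pvPrio, hm, hc]
        have hmax : max m 1 = m := by omega
        rw [hp, hmax, ih m h1 h3]
        have hcb : ("critical" == pvGetSev c) = false := by
          simp only [beq_eq_false_iff_ne]; exact Ne.symm hc
        have hmb : ("moderate" == pvGetSev c) = false := by
          simp only [beq_eq_false_iff_ne]; exact Ne.symm hm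
        rw [hcb, hmb]
        simp only [Bool.false_or]

-- ===== VERDICT (by name: the statement is the Claim_ definition above) =====
theorem assess_corruption_severity_py_spec : Claim_equal_assess_corruption_severity_py := by
  unfold Claim_equal_assess_corruption_severity_py
  intro corruptions _
  unfold Spec_assess_corruption_severity_py
  cases corruptions with
  | nil => rfl
  | cons c xs =>
    simp only [assess_corruption_severity_py, assess_corruption_severity_py_alt]
    rw [pvFold_char (c :: xs) 1 (by omega) (by omega)]
    simp only [if_neg (List.cons_ne_nil c xs)]
    split_ifs <;> simp_all
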